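-- pv_equiv track=rewrite | github.com/Jasmetk0/fax | msa/services/seed_anchors.py | _serpentine_positions
-- ===== SOURCE A (Python) =====
-- def _serpentine_positions(draw_size: int) -> list[int]:
--     """Return slot order for seeds 1..draw_size using serpentine seeding."""
--     if draw_size == 1:
--         return [1]
--     prev = _serpentine_positions(draw_size // 2)
--     out: list[int] = []
--     for p in prev:
--         out.append(p)
--         out.append(draw_size + 1 - p)
--     return out
-- ===== SOURCE B (Python) =====
-- def _serpentine_positions(draw_size: int) -> list[int]:
--     """Return slot order for seeds 1..draw_size using serpentine seeding."""
--     sizes = []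
--     n = draw_size
--     while n > 1:
--         sizes.append(n)
--         n //= 2
--     out = [1]
--     for s in reversed(sizes):
--         new = []
--         for p in out:
--             new.append(p)
--             new.append(s + 1 - p)
--         out = new
--     return out
-- ===== Notes on version B (the rewrite author's own statement) =====
-- stated objective: alternative
-- what changed: Replaced the top-down recursion with a bottom-up iteration: a while loop first collects the halving size chain, then the slot list is grown from the singleton seed by folding over that chain in reverse.
-- outside the precondition, e.g. on _serpentine_positions(0): A raises RecursionError, B returns [1]
import Mathlib
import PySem

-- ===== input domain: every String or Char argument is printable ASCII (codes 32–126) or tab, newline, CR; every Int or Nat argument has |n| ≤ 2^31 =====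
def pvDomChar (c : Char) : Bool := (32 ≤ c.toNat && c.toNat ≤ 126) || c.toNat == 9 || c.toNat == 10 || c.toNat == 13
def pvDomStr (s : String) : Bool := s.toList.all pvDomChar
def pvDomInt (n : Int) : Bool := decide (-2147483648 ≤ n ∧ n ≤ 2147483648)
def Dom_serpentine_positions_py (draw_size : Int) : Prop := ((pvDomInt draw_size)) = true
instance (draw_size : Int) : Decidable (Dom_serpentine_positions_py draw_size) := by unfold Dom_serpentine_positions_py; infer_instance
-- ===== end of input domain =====

-- B replaces A's top-down recursion by a bottom-up loop over the halving size chain (alternative decomposition, same cost).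

-- ===== PORT A =====
-- A is recursive; fuel only makes the recursion total in Lean (enough fuel is proved below for draw_size ≥ 1).
def serpAAux : Nat → Int → List Int
  | 0, _ => []
  | fuel + 1, n =>
    if n = 1 then [1]
    else
      (serpAAux fuel (PySem.Int.floordiv n 2)).foldl
        (fun out p => out ++ [p] ++ [n + 1 - p]) []

def serpentine_positions_py (draw_size : Int) : List Int :=
  serpAAux (draw_size.toNat + 1) draw_size

-- ===== PORT B =====
-- the while loop collecting sizes: while n > 1: sizes.append(n); n //= 2
def serpChain (n : Int) : List Int :=
  if 1 < n then n :: serpChain (PySem.Int.floordiv n 2) else []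
termination_by n.toNat
decreasing_by
  rw [PySem.Int.floordiv_eq_ediv_of_pos (by omega : (0:Int) < 2)]
  omega

def serpentine_positions_py_alt (draw_size : Int) : List Int :=
  (serpChain draw_size).reverse.foldl
    (fun out s => out.foldl (fun acc p => acc ++ [p] ++ [s + 1 - p]) []) [1]

-- ===== PRECONDITION & SPEC =====
-- A returns exactly on draw_size ≥ 1; for draw_size ≤ 0 it recurses forever (RecursionError).
def Pre_serpentine_positions_py (draw_size : Int) : Prop := 1 ≤ draw_size
instance (draw_size : Int) : Decidable (Pre_serpentine_positions_py draw_size) := by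
  unfold Pre_serpentine_positions_py; infer_instance

def pvWitness_serpentine_positions_py : Int := 8

def Spec_serpentine_positions_py (draw_size : Int) (out : List Int) : Prop :=
  out = serpentine_positions_py_alt draw_size
instance (draw_size : Int) (out : List Int) : Decidable (Spec_serpentine_positions_py draw_size out) := by
  unfold Spec_serpentine_positions_py; infer_instance

-- ===== CLAIM (what is proved, stated in full; the proofs are below) =====
def Claim_equal_serpentine_positions_py : Prop :=
  ∀ (draw_size : Int), Dom_serpentine_positions_py draw_size →
    Pre_serpentine_positions_py draw_size →
    Spec_serpentine_positions_py draw_size (serpentine_positions_py draw_size)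

-- ===== LEMMAS AND PROOFS =====

theorem serpChain_le (n : Int) (h : ¬ 1 < n) : serpChain n = [] := by
  rw [serpChain]; simp [h]

theorem serpChain_gt (n : Int) (h : 1 < n) :
    serpChain n = n :: serpChain (PySem.Int.floordiv n 2) := by
  rw [serpChain]; simp [h]

theorem serpAAux_eq_foldr (fuel : Nat) :
    ∀ n : Int, 1 ≤ n → n.toNat < fuel →
      serpAAux fuel n =
        (serpChain n).foldr
          (fun s out => out.foldl (fun acc p => acc ++ [p] ++ [s + 1 - p]) []) [1] := by
  induction fuel with
  | zero => intro n h1 h2; omega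
  | succ fuel ih =>
    intro n h1 h2
    by_cases hn : n = 1
    · subst hn
      simp [serpAAux, serpChain_le 1 (by omega)]
    · have hgt : 1 < n := by omega
      have hfd : PySem.Int.floordiv n 2 = n / 2 :=
        PySem.Int.floordiv_eq_ediv_of_pos (by omega)
      rw [serpChain_gt n hgt]
      simp only [serpAAux, if_neg hn, List.foldr_cons]
      rw [ih (PySem.Int.floordiv n 2) (by rw [hfd]; omega) (by rw [hfd]; omega)]

theorem serpentine_positions_py_spec : Claim_equal_serpentine_positions_py := by
  intro n _ hpre
  unfold Spec_serpentine_positions_py serpentine_positions_py serpentine_positions_py_alt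
  rw [serpAAux_eq_foldr (n.toNat + 1) n hpre (by omega), List.foldl_reverse]
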